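-- pv_equiv track=rewrite | github.com/Krisz-tina/MouseDynamics | user_interface/verifying_session.py | get_begin_end_points
-- ===== SOURCE A (Python) =====
-- def get_begin_end_points(array):
--     i = 0
--     users_start_row_number = [i]
--     users_end_row_number = []
--     user_ids = []
--     row = array[i]
--     while i < len(array):
--         user_id = int(row[-1])
--         user_ids.append(user_id)
--         while row[-1] == user_id:
--             i += 1
--             if i != len(array):
--                 row = array[i]
--             else:
--                 users_end_row_number.append(i - 1)
--                 return users_start_row_number, users_end_row_number, user_ids
--         users_end_row_number.append(i - 1)
--         users_start_row_number.append(i)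
--     users_end_row_number.append(i - 1)
--     return users_start_row_number, users_end_row_number, user_ids
-- ===== SOURCE B (Python) =====
-- def get_begin_end_points(array):
--     n = len(array)
--     ids0 = [row[-1] for row in array]
--     boundaries = [i for i in range(1, n) if ids0[i] != ids0[i - 1]]
--     starts = [0] + boundaries
--     ends = [b - 1 for b in boundaries] + [n - 1]
--     ids = [int(ids0[s]) for s in starts]
--     return starts, ends, ids
-- ===== Notes on version B (the rewrite author's own statement) =====
-- stated objective: simpler
-- what changed: A's nested while loops sharing one index cursor (inner loop advancing until the user id changes, with a mid-loop early return) are replaced by first building the list of change-point indices with one comprehension and then deriving starts, ends and ids from it by separate passes.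
import Mathlib
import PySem

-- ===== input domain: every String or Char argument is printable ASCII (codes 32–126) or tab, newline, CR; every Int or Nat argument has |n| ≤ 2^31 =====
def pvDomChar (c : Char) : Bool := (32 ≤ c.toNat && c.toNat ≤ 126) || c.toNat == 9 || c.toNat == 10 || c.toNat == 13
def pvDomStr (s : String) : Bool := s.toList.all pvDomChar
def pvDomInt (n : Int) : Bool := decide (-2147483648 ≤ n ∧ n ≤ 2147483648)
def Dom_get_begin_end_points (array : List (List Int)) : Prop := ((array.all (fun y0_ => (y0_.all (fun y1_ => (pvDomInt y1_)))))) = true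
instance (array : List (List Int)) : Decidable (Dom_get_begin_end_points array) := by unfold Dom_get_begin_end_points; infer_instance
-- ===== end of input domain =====

-- B replaces A's nested-while shared-index scan by first building the list of change-point
-- indices and deriving starts/ends/ids from it (objective: simpler; return value only).

-- ===== PORT A =====
-- row[-1]  (Python raises on an empty row; Pre_ excludes empty rows, so the default is never used)
def pvLast (row : List Int) : Int := (PySem.List.pyGet? row (-1)).getD 0

-- inner `while row[-1] == user_id` loop: returns (final i, whether `i == len(array)` was reached)
def pvInnerA (a : List (List Int)) (uid : Int) (i : Nat) : Nat × Bool :=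
  if h : i < a.length then
    if pvLast a[i] == uid then
      if i + 1 = a.length then (i + 1, true)
      else pvInnerA a uid (i + 1)
    else (i, false)
  else (i, true)
termination_by a.length - i
decreasing_by omega

-- needed by outerA's termination proof, so it stays above the port
theorem pvInnerA_ge (a : List (List Int)) (uid : Int) (i : Nat) :
    i ≤ (pvInnerA a uid i).1 := by
  fun_induction pvInnerA a uid i with
  | case1 i h heq hlen => simp
  | case2 i h heq hlen ih => simp at ih ⊢; omega
  | case3 i h heq => simp
  | case4 i h => simp

theorem pvInnerA_gt (a : List (List Int)) (i : Nat) (h : i < a.length) :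
    i < (pvInnerA a (pvLast a[i]) i).1 := by
  rw [pvInnerA]
  simp only [h, dif_pos, beq_self_eq_true, if_pos]
  split
  · simp
  · have := pvInnerA_ge a (pvLast a[i]) (i + 1); omega

-- outer `while i < len(array)` loop (the code after it is Python's unreachable tail)
def pvOuterA (a : List (List Int)) (i : Nat) (S E I : List Int) :
    List Int × List Int × List Int :=
  if h : i < a.length then
    let uid := pvLast a[i]
    let I' := I ++ [uid]
    let r := pvInnerA a uid i
    if r.2 then (S, E ++ [(r.1 : Int) - 1], I')
    else pvOuterA a r.1 (S ++ [(r.1 : Int)]) (E ++ [(r.1 : Int) - 1]) I'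
  else (S, E ++ [(i : Int) - 1], I)
termination_by a.length - i
decreasing_by have := pvInnerA_gt a i h; omega

def get_begin_end_points (array : List (List Int)) : List Int × List Int × List Int :=
  pvOuterA array 0 [0] [] []

-- ===== PORT B =====
def get_begin_end_points_alt (array : List (List Int)) : List Int × List Int × List Int :=
  let n : Int := array.length
  let ids0 : List Int := array.map pvLast
  let boundaries : List Int :=
    (PySem.List.pyRange 1 n 1).filter
      (fun i => !(PySem.List.pyGetD ids0 i 0 == PySem.List.pyGetD ids0 (i - 1) 0))
  let starts : List Int := 0 :: boundaries
  let ends : List Int := boundaries.map (fun b => b - 1) ++ [n - 1]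
  let ids : List Int := starts.map (fun s => PySem.List.pyGetD ids0 s 0)
  (starts, ends, ids)

-- ===== PRECONDITION & SPEC =====
-- Pre_ excludes exactly the inputs on which Python A raises IndexError:
-- the empty list (array[0]) and arrays containing an empty row (row[-1]).
def Pre_get_begin_end_points (array : List (List Int)) : Prop :=
  array ≠ [] ∧ ∀ row ∈ array, row ≠ []
instance (array : List (List Int)) : Decidable (Pre_get_begin_end_points array) := by
  unfold Pre_get_begin_end_points; infer_instance

def pvWitness_get_begin_end_points : List (List Int) := [[1, 7], [2, 7], [3, 9]]

def Spec_get_begin_end_points (array : List (List Int)) (out : List Int × List Int × List Int) : Prop := out = get_begin_end_points_alt array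
instance (array : List (List Int)) (out : List Int × List Int × List Int) : Decidable (Spec_get_begin_end_points array out) := by unfold Spec_get_begin_end_points; infer_instance

-- ===== CLAIM (what is proved, stated in full; the proofs are below) =====
def Claim_equal_get_begin_end_points : Prop := ∀ (array : List (List Int)), Dom_get_begin_end_points array → Pre_get_begin_end_points array → Spec_get_begin_end_points array (get_begin_end_points array)

-- ===== LEMMAS AND PROOFS =====

-- id of row k (total helper used by the proofs)
def pvF (a : List (List Int)) (k : Nat) : Int := pvLast (a.getD k [])

-- boundary indices strictly above i, as naturals
def pvBnds (a : List (List Int)) (i : Nat) : List Nat :=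
  (List.range' (i + 1) (a.length - (i + 1))).filter
    (fun k => pvF a k != pvF a (k - 1))

theorem pvInnerA_le (a : List (List Int)) (uid : Int) (i : Nat) (h : i ≤ a.length) :
    (pvInnerA a uid i).1 ≤ a.length := by
  fun_induction pvInnerA a uid i with
  | case1 i h heq hlen => simp [hlen]
  | case2 i h heq hlen ih => exact ih (by omega)
  | case3 i h heq => simp; omega
  | case4 i h => simpa using h

theorem pvInnerA_snd (a : List (List Int)) (uid : Int) (i : Nat) (h : i ≤ a.length) :
    (pvInnerA a uid i).2 = decide ((pvInnerA a uid i).1 = a.length) := by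
  fun_induction pvInnerA a uid i with
  | case1 i h heq hlen => simp [hlen]
  | case2 i h heq hlen ih => exact ih (by omega)
  | case3 i h heq => simp; omega
  | case4 i h => simp; omega

theorem pvInnerA_const (a : List (List Int)) (uid : Int) (i : Nat) :
    ∀ k, i ≤ k → k < (pvInnerA a uid i).1 → pvF a k = uid := by
  fun_induction pvInnerA a uid i with
  | case1 i h heq hlen =>
    intro k hk1 hk2; simp at hk2
    have : k = i := by omega
    subst this
    simpa [pvF, List.getD_eq_getElem?_getD, h] using heq
  | case2 i h heq hlen ih =>
    intro k hk1 hk2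
    rcases Nat.eq_or_lt_of_le hk1 with rfl | hlt
    · simpa [pvF, List.getD_eq_getElem?_getD, h] using heq
    · exact ih k hlt hk2
  | case3 i h heq => intro k hk1 hk2; simp at hk2; omega
  | case4 i h => intro k hk1 hk2; simp at hk2; omega

theorem pvInnerA_stop (a : List (List Int)) (uid : Int) (i : Nat) :
    (pvInnerA a uid i).1 < a.length → pvF a (pvInnerA a uid i).1 ≠ uid := by
  fun_induction pvInnerA a uid i with
  | case1 i h heq hlen => intro hlt; simp at hlt; omega
  | case2 i h heq hlen ih => exact ih
  | case3 i h heq =>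
    intro hlt hcon
    simp only at hlt
    apply heq
    simp [pvF, List.getD_eq_getElem?_getD, h] at hcon
    simp [hcon]
  | case4 i h => intro hlt; omega

-- splitting of the boundary list at the next change point
theorem pvBnds_step (a : List (List Int)) (i j : Nat) (hij : i < j) (hjn : j ≤ a.length)
    (hconst : ∀ k, i ≤ k → k < j → pvF a k = pvF a i) :
    pvBnds a i =
      if h : j < a.length then
        if pvF a j ≠ pvF a i then j :: pvBnds a j else pvBnds a j
      else [] := by
  unfold pvBnds
  have hnone : ∀ k ∈ List.range' (i + 1) (j - (i + 1)), ¬((pvF a k != pvF a (k - 1)) = true) := by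
    intro k hk
    rw [List.mem_range'_1] at hk
    have h1 : pvF a k = pvF a i := hconst k (by omega) (by omega)
    have h2 : pvF a (k - 1) = pvF a i := hconst (k - 1) (by omega) (by omega)
    simp [h1, h2]
  by_cases h : j < a.length
  · rw [dif_pos h]
    have hsplit : List.range' (i + 1) (a.length - (i + 1)) =
        List.range' (i + 1) (j - (i + 1)) ++ List.range' j (a.length - j) := by
      have := List.range'_append_1 (s := i + 1) (m := j - (i + 1)) (n := a.length - j)
      rw [show (i + 1) + (j - (i + 1)) = j by omega] at this
      rw [show j - (i + 1) + (a.length - j) = a.length - (i + 1) by omega] at this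
      exact this.symm
    rw [hsplit, List.filter_append, List.filter_eq_nil_iff.mpr hnone, List.nil_append]
    rw [show a.length - j = (a.length - (j + 1)) + 1 by omega, List.range'_succ,
        List.filter_cons]
    have h2 : pvF a (j - 1) = pvF a i := hconst (j - 1) (by omega) (by omega)
    by_cases hb : pvF a j = pvF a i
    · simp [h2, hb]
    · simp [h2, hb]
  · rw [dif_neg h]
    have hj : j = a.length := by omega
    subst hj
    exact List.filter_eq_nil_iff.mpr hnone

-- the outer loop in terms of pvBnds
theorem pvOuterA_eq (a : List (List Int)) (i : Nat) (hi : i < a.length) (S E I : List Int) :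
    pvOuterA a i S E I =
      (S ++ (pvBnds a i).map (fun k : Nat => (k : Int)),
       E ++ (pvBnds a i).map (fun k : Nat => (k : Int) - 1) ++ [(a.length : Int) - 1],
       I ++ ((i :: pvBnds a i).map (pvF a))) := by
  rw [pvOuterA]
  simp only [hi, dif_pos]
  have huidf : pvLast a[i] = pvF a i := by
    simp [pvF, List.getD_eq_getElem?_getD, hi]
  have hgt : i < (pvInnerA a (pvLast a[i]) i).1 := pvInnerA_gt a i hi
  have hle : (pvInnerA a (pvLast a[i]) i).1 ≤ a.length :=
    pvInnerA_le a (pvLast a[i]) i (le_of_lt hi)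
  have hsnd : (pvInnerA a (pvLast a[i]) i).2 =
      decide ((pvInnerA a (pvLast a[i]) i).1 = a.length) :=
    pvInnerA_snd a (pvLast a[i]) i (le_of_lt hi)
  have hconst : ∀ k, i ≤ k → k < (pvInnerA a (pvLast a[i]) i).1 → pvF a k = pvF a i := by
    intro k h1 h2
    rw [← huidf]
    exact pvInnerA_const a (pvLast a[i]) i k h1 h2
  have hb := pvBnds_step a i (pvInnerA a (pvLast a[i]) i).1 hgt hle hconst
  by_cases hend : (pvInnerA a (pvLast a[i]) i).1 = a.length
  · rw [hsnd]
    simp only [hend, decide_true, if_true]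
    rw [dif_neg (by omega)] at hb
    simp [hb, huidf]
  · have hlt : (pvInnerA a (pvLast a[i]) i).1 < a.length := lt_of_le_of_ne hle hend
    rw [hsnd]
    simp only [hend, decide_false, Bool.false_eq_true, if_false]
    rw [dif_pos hlt] at hb
    have hstop : pvF a (pvInnerA a (pvLast a[i]) i).1 ≠ pvF a i := by
      rw [← huidf]
      exact pvInnerA_stop a (pvLast a[i]) i hlt
    rw [if_pos hstop] at hb
    rw [pvOuterA_eq a (pvInnerA a (pvLast a[i]) i).1 hlt]
    rw [hb]
    simp [huidf]
termination_by a.length - i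
decreasing_by omega

-- pyGetD on the row-id list, at an in-range natural index
theorem pvGetIds (a : List (List Int)) (k : Nat) (hk : k < a.length) :
    PySem.List.pyGetD (a.map pvLast) ((k : Nat) : Int) 0 = pvF a k := by
  rw [PySem.List.pyGetD_natCast]
  simp [pvF, List.getD_eq_getElem?_getD, hk]

-- port B's boundary list is the cast of the Nat-level boundary list
theorem pvBoundaries_eq (a : List (List Int)) (h0 : 0 < a.length) :
    (PySem.List.pyRange 1 (a.length : Int) 1).filter
      (fun i => !(PySem.List.pyGetD (a.map pvLast) i 0 ==
                  PySem.List.pyGetD (a.map pvLast) (i - 1) 0)) =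
    (pvBnds a 0).map (fun k : Nat => (k : Int)) := by
  have hrange : PySem.List.pyRange 1 (a.length : Int) 1 =
      (List.range' 1 (a.length - 1)).map (fun k : Nat => (k : Int)) := by
    rw [PySem.List.pyRange_one, List.range'_eq_map_range]
    rw [show ((a.length : Int) - 1).toNat = a.length - 1 by omega]
    rw [List.map_map]
    apply List.map_congr_left
    intro k _
    simp
  rw [hrange, List.filter_map]
  unfold pvBnds
  congr 1
  apply List.filter_congr
  intro k hk
  rw [List.mem_range'_1] at hk
  simp only [Function.comp]
  rw [pvGetIds a k (by omega)]
  rw [show ((k : Nat) : Int) - 1 = ((k - 1 : Nat) : Int) by omega]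
  rw [pvGetIds a (k - 1) (by omega)]
  simp [bne]

-- ===== VERDICT (by name: the statement is the Claim_ definition above) =====
theorem get_begin_end_points_spec : Claim_equal_get_begin_end_points := by
  intro a _ hpre
  obtain ⟨hne, -⟩ := hpre
  have h0 : 0 < a.length := List.length_pos_iff.mpr hne
  unfold Spec_get_begin_end_points get_begin_end_points get_begin_end_points_alt
  rw [pvOuterA_eq a 0 h0]
  simp only []
  rw [pvBoundaries_eq a h0]
  refine Prod.ext ?_ (Prod.ext ?_ ?_)
  · simp
  · simp only [List.nil_append, List.map_map]
    simp [Function.comp_def]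
  · have hz : PySem.List.pyGetD (a.map pvLast) 0 0 = pvF a 0 := by
      simpa using pvGetIds a 0 h0
    simp only [List.nil_append, List.map_cons, List.map_map, hz]
    congr 1
    apply List.map_congr_left
    intro k hk
    have hkr : k < a.length := by
      unfold pvBnds at hk
      have := List.mem_range'_1.mp (List.mem_of_mem_filter hk)
      omega
    simp only [Function.comp_apply]
    exact (pvGetIds a k hkr).symm
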